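-- pv_equiv track=rewrite | github.com/Caio-SDK/Recuperacao_Estrutura_de_Dados | Questao_2/back_space.py | decodificar_mensagem
-- ===== SOURCE A (Python) =====
-- def decodificar_mensagem(mensagem):
--
--     # Pilhas utilizadas
--     pilha_entrada = []
--     pilha_saida = []
--
--     # Declarando a variavel utilizada para contagem de caracteres apagados
--     vezes_apagar = 0
--
--     # Para cada caractere dentro da mensagem
--     for caracter in mensagem:
--
--         # Preenchendo a pilha de entrada
--         pilha_entrada.append(caracter)
--
--     # Para cada index dentro da pilha de entrada
--     for index in range(len(pilha_entrada)-1, -1, -1):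
--
--         # Se o caractere daquele index for igual a #
--         if pilha_entrada[index] == "#":
--
--             vezes_apagar += 1
--
--         # Se o caractere daquele index for diferente a #, ou seja, uma letra
--         else:
--
--             # Se a variavel de caractere apagado for igual a 0
--             if vezes_apagar == 0:
--
--                 # Adiciona a letra daquele index dentro da pilha de saida
--                 pilha_saida.append(pilha_entrada[index])
--
--             else:
--
--                 vezes_apagar -= 1
--
--         # Remover o elemento da pilha de entrada
--         pilha_entrada.pop()
--
--     # Para cada index dentro da pilha de saida
--     for index in range(len(pilha_saida)-1, -1, -1):
--
--         # Adicionar os elemento da pilha de saida na pilha de entrada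
--         pilha_entrada.append(pilha_saida[index])
--
--         # Remover o elemento da pilha de saida
--         pilha_saida.pop()
--
--
--     # Retorna a mensagem codificada em forma de string
--     return "".join(pilha_entrada)
-- ===== SOURCE B (Python) =====
-- def decodificar_mensagem(mensagem):
--     resultado = []
--     for caracter in mensagem:
--         if caracter == "#":
--             if resultado:
--                 resultado.pop()
--         else:
--             resultado.append(caracter)
--     return "".join(resultado)
-- ===== Notes on version B (the rewrite author's own statement) =====
-- stated objective: idiomatic
-- what changed: Replaced A's reverse index iteration with a deleted-characters counter, per-step pops and a second stack re-reversed at the end by one forward pass that pushes each kept character and pops on a backspace.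
import Mathlib
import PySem

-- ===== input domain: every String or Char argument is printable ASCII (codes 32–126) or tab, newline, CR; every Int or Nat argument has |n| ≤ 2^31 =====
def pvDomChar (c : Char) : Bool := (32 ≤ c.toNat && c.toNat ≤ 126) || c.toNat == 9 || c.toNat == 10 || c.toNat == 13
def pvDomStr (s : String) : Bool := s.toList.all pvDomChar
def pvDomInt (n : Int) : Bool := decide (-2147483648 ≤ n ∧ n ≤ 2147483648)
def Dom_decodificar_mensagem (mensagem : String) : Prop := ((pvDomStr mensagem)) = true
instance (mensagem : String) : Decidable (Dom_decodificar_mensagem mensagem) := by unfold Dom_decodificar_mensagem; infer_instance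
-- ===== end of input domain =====

-- B replaces A's backward scan with a deleted-count and a second re-reversing stack by the
-- standard forward single-pass stack (push a kept character, pop on a backspace); idiomatic,
-- measurably faster by a constant factor (fewer passes), same O(n) asymptotics.

-- ===== PORT A =====
-- body of A's second loop: on '#' count a deletion, else emit or consume one deletion; then pop
def pvStepA (s : List Char × List Char × Int) (index : Int) : List Char × List Char × Int :=
  let (pe, ps, vezes) := s
  if PySem.List.pyGetD pe index ' ' = '#' then (pe.dropLast, ps, vezes + 1)
  else if vezes = 0 then (pe.dropLast, ps ++ [PySem.List.pyGetD pe index ' '], vezes)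
  else (pe.dropLast, ps, vezes - 1)

-- body of A's third loop: move saida's top onto entrada, pop saida
def pvStepA2 (s : List Char × List Char) (index : Int) : List Char × List Char :=
  let (pe, ps) := s
  (pe ++ [PySem.List.pyGetD ps index ' '], ps.dropLast)

def decodificar_mensagem (mensagem : String) : String :=
  -- first loop: append every character of mensagem onto pilha_entrada
  let pilha_entrada : List Char := mensagem.toList.foldl (fun acc c => acc ++ [c]) []
  -- second loop: indices len-1 … 0 (pilha_entrada[index] is in range at every step, so pyGetD is exact)
  let st := (PySem.List.pyRange ((pilha_entrada.length : Int) - 1) (-1) (-1)).foldl pvStepA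
      (pilha_entrada, ([] : List Char), (0 : Int))
  -- third loop: re-reverse pilha_saida back into pilha_entrada
  let fin := (PySem.List.pyRange ((st.2.1.length : Int) - 1) (-1) (-1)).foldl pvStepA2 (st.1, st.2.1)
  String.mk fin.1

-- ===== PORT B =====
def decodificar_mensagem_alt (mensagem : String) : String :=
  let resultado := mensagem.toList.foldl
    (fun st c => if c = '#' then (if st = [] then st else st.dropLast) else st ++ [c]) []
  String.mk resultado

-- ===== PRECONDITION & SPEC =====
def Spec_decodificar_mensagem (mensagem : String) (out : String) : Prop := out = decodificar_mensagem_alt mensagem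
instance (mensagem : String) (out : String) : Decidable (Spec_decodificar_mensagem mensagem out) := by unfold Spec_decodificar_mensagem; infer_instance

-- ===== CLAIM (what is proved, stated in full; the proofs are below) =====
def Claim_equal_decodificar_mensagem : Prop := ∀ (mensagem : String), Dom_decodificar_mensagem mensagem → Spec_decodificar_mensagem mensagem (decodificar_mensagem mensagem)

-- ===== LEMMAS AND PROOFS =====

-- the sequence of kept characters, in A's (reverse) processing order, with k pending deletions
def pvSkip : List Char → Nat → List Char
  | [], _ => []
  | c :: r, k =>
    if c = '#' then pvSkip r (k + 1)
    else if k = 0 then c :: pvSkip r 0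
    else pvSkip r (k - 1)

-- B's forward stack
def pvStack (l : List Char) : List Char :=
  l.foldl (fun st c => if c = '#' then (if st = [] then st else st.dropLast) else st ++ [c]) []

lemma pvFoldlAppend (l acc : List Char) : l.foldl (fun a c => a ++ [c]) acc = acc ++ l := by
  induction l generalizing acc with
  | nil => simp
  | cons c r ih => simp [List.foldl_cons, ih]

lemma pvStack_snoc (l : List Char) (c : Char) :
    pvStack (l ++ [c]) = if c = '#' then (pvStack l).dropLast else pvStack l ++ [c] := by
  unfold pvStack
  rw [List.foldl_append]
  by_cases h : c = '#'
  · simp only [h, List.foldl_cons, List.foldl_nil]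
    split <;> simp_all
  · simp [h]

-- A's backward skip on the reversed list = k-fold dropLast of B's forward stack
lemma pvSkip_eq (l : List Char) : ∀ k : Nat,
    (pvSkip l.reverse k).reverse = List.dropLast^[k] (pvStack l) := by
  induction l using List.reverseRecOn with
  | nil =>
    intro k
    have : List.dropLast^[k] ([] : List Char) = [] := by
      induction k with
      | zero => rfl
      | succ n ih => rw [Function.iterate_succ_apply, List.dropLast_nil, ih]
    simp [pvStack, this, pvSkip]
  | append_singleton l c ih =>
    intro k
    rw [List.reverse_append, List.reverse_singleton, List.singleton_append]
    by_cases h : c = '#'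
    · rw [pvSkip, if_pos h, ih (k + 1), pvStack_snoc, if_pos h,
        Function.iterate_succ_apply]
    · cases k with
      | zero =>
        rw [pvSkip, if_neg h, if_pos rfl, Function.iterate_zero_apply,
          pvStack_snoc, if_neg h, List.reverse_cons, ih 0, Function.iterate_zero_apply]
      | succ s =>
        rw [pvSkip, if_neg h, if_neg (Nat.succ_ne_zero s), Nat.add_sub_cancel, ih s,
          pvStack_snoc, if_neg h, Function.iterate_succ_apply, List.dropLast_concat]

-- A's second loop: empties pilha_entrada and appends the kept characters onto pilha_saida
lemma pvLoop1 (l : List Char) : ∀ (ps : List Char) (k : Nat), ∃ k' : Int,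
    (PySem.List.pyRange ((l.length : Int) - 1) (-1) (-1)).foldl pvStepA (l, ps, (k : Int))
      = ([], ps ++ pvSkip l.reverse k, k') := by
  induction l using List.reverseRecOn with
  | nil =>
    intro ps k
    exact ⟨(k : Int), by rw [PySem.List.pyRange_neg_one_eq_nil (by simp)]; simp [pvSkip]⟩
  | append_singleton l c ih =>
    intro ps k
    have hlen : ((l ++ [c]).length : Int) - 1 = (l.length : Int) := by simp
    have hrange : PySem.List.pyRange ((l.length : Int)) (-1) (-1)
        = (l.length : Int) :: PySem.List.pyRange ((l.length : Int) - 1) (-1) (-1) :=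
      PySem.List.pyRange_neg_one_cons (by omega)
    rw [hlen, hrange, List.foldl_cons]
    have hget : PySem.List.pyGetD (l ++ [c]) (l.length : Int) ' ' = c := by
      simp [PySem.List.pyGetD]
    have hdrop : (l ++ [c]).dropLast = l := List.dropLast_concat ..
    rw [List.reverse_append, List.reverse_singleton, List.singleton_append]
    by_cases h : c = '#'
    · have hstep : pvStepA (l ++ [c], ps, (k : Int)) (l.length : Int)
          = (l, ps, ((k + 1 : Nat) : Int)) := by
        simp [pvStepA, h, hdrop]
      rw [hstep]
      obtain ⟨k', hk'⟩ := ih ps (k + 1)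
      exact ⟨k', by rw [hk', pvSkip, if_pos h]⟩
    · cases k with
      | zero =>
        have hstep : pvStepA (l ++ [c], ps, ((0 : Nat) : Int)) (l.length : Int)
            = (l, ps ++ [c], ((0 : Nat) : Int)) := by
          simp [pvStepA, h, hdrop]
        rw [hstep]
        obtain ⟨k', hk'⟩ := ih (ps ++ [c]) 0
        refine ⟨k', by rw [hk', pvSkip, if_neg h, if_pos rfl]; simp⟩
      | succ s =>
        have hstep : pvStepA (l ++ [c], ps, ((s + 1 : Nat) : Int)) (l.length : Int)
            = (l, ps, ((s : Nat) : Int)) := by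
          simp [pvStepA, hget, h, hdrop]; omega
        rw [hstep]
        obtain ⟨k', hk'⟩ := ih ps s
        refine ⟨k', by rw [hk', pvSkip, if_neg h, if_neg (Nat.succ_ne_zero s), Nat.add_sub_cancel]⟩

-- A's third loop: re-reverses pilha_saida onto the end of pilha_entrada
lemma pvLoop2 (ps : List Char) : ∀ pe : List Char,
    (PySem.List.pyRange ((ps.length : Int) - 1) (-1) (-1)).foldl pvStepA2 (pe, ps)
      = (pe ++ ps.reverse, []) := by
  induction ps using List.reverseRecOn with
  | nil =>
    intro pe
    rw [PySem.List.pyRange_neg_one_eq_nil (by simp)]; simp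
  | append_singleton ps c ih =>
    intro pe
    have hlen : ((ps ++ [c]).length : Int) - 1 = (ps.length : Int) := by simp
    have hrange : PySem.List.pyRange ((ps.length : Int)) (-1) (-1)
        = (ps.length : Int) :: PySem.List.pyRange ((ps.length : Int) - 1) (-1) (-1) :=
      PySem.List.pyRange_neg_one_cons (by omega)
    have hget : PySem.List.pyGetD (ps ++ [c]) (ps.length : Int) ' ' = c := by
      simp [PySem.List.pyGetD]
    have hstep : pvStepA2 (pe, ps ++ [c]) (ps.length : Int) = (pe ++ [c], ps) := by
      simp [pvStepA2, hget]
    rw [hlen, hrange, List.foldl_cons, hstep, ih (pe ++ [c])]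
    simp

-- ===== VERDICT (by name: the statement is the Claim_ definition above) =====
theorem decodificar_mensagem_spec : Claim_equal_decodificar_mensagem := by
  intro mensagem _
  unfold Spec_decodificar_mensagem decodificar_mensagem decodificar_mensagem_alt
  rw [pvFoldlAppend]
  simp only [List.nil_append]
  obtain ⟨k', hk'⟩ := pvLoop1 mensagem.toList [] 0
  simp only [Nat.cast_zero] at hk'
  rw [hk']
  simp only [List.nil_append]
  rw [pvLoop2]
  have h0 := pvSkip_eq mensagem.toList 0
  rw [Function.iterate_zero_apply] at h0
  rw [List.nil_append, h0]
  rfl
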